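-- pv_equiv track=rewrite | github.com/maximormz/GenoLab | algorithms/string_matching.py | kmp_search_all_occurrences
-- ===== SOURCE A (Python) =====
-- def kmp_search_all_occurrences(text, pattern): # Retorna un generador (Convertir en lista al recibirlo)
--     if not text or not pattern:
--         return
--
--     n = len(text)
--     m = len(pattern)
--
--     i,j = 0,0
--
--     failure_table = build_failure_table(pattern)
--
--     while i < n:
--         if text[i] == pattern[j]:
--             i += 1
--             j += 1
--
--             if j == m:
--                 yield i - m
--                 j = failure_table[j-1]
--         else:
--             if j > 0:
--                 j = failure_table[j-1]
--             else:
--                 i += 1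
--
-- def build_failure_table(pattern):
--     """Construye tabla de fallos para KMP"""
--     n = len(pattern)
--     lps = [0] * n
--
--     length = 0
--     i = 1
--
--     while i < n:
--         if pattern[i] == pattern[length]:
--             length += 1
--             lps[i] = length
--             i += 1
--         else:
--             if length != 0:
--                 length = lps[length - 1]
--             else:
--                 lps[i] = 0
--                 i += 1
--     return lps
-- ===== SOURCE B (Python) =====
-- def kmp_search_all_occurrences(text, pattern): # Retorna un generador (Convertir en lista al recibirlo)
--     if not text or not pattern:
--         return
--     n = len(text)
--     m = len(pattern)
--     for i in range(n - m + 1):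
--         if text[i:i+m] == pattern:
--             yield i
-- ===== Notes on version B (the rewrite author's own statement) =====
-- stated objective: simpler
-- what changed: Replaced KMP (failure table + stateful two-pointer scan) by a naive sliding-window generator that compares the slice text[i:i+m] against the pattern at every start position.
import Mathlib
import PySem

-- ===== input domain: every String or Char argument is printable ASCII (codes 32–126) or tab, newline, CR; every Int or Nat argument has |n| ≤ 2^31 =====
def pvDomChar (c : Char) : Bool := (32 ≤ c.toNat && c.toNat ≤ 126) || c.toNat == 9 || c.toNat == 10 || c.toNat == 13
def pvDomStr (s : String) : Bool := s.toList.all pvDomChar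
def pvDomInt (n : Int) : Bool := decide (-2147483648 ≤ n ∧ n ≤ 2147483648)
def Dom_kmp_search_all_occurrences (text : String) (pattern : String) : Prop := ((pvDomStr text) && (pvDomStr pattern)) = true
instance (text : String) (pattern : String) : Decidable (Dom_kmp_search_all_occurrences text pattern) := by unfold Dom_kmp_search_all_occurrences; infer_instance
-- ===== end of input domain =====

-- B replaces KMP (failure table + stateful two-pointer scan) by a naive sliding-window
-- scan comparing text[i:i+m] to the pattern at every start; simpler, not faster.

-- ===== PORT A =====
-- loop of build_failure_table; the fuel only makes the same computation total
-- (each iteration strictly decreases 2*(n-i)+length, so fuel 2*n is never exhausted).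
def pvFailLoop (p : List Char) (lps : List Nat) (len i : Nat) : Nat → List Nat
  | 0 => lps
  | fuel+1 =>
    if i < p.length then
      if p.getD i ' ' = p.getD len ' ' then
        pvFailLoop p (lps.set i (len+1)) (len+1) (i+1) fuel
      else if len ≠ 0 then
        pvFailLoop p lps (lps.getD (len-1) 0) i fuel
      else
        pvFailLoop p (lps.set i 0) len (i+1) fuel
    else lps

def pvBuildFailureTable (p : List Char) : List Nat :=
  pvFailLoop p (List.replicate p.length 0) 0 1 (2 * p.length)

-- the main while-loop of A; fuel 2*n+m is never exhausted (measure 2*(n-i)+j decreases).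
def pvSearchLoop (t p : List Char) (f : List Nat) (i j : Nat) (acc : List Int) : Nat → List Int
  | 0 => acc
  | fuel+1 =>
    if i < t.length then
      if t.getD i ' ' = p.getD j ' ' then
        if j + 1 = p.length then
          pvSearchLoop t p f (i+1) (f.getD (j+1-1) 0) (acc ++ [((i:Int)+1) - (p.length:Int)]) fuel
        else
          pvSearchLoop t p f (i+1) (j+1) acc fuel
      else if j > 0 then
        pvSearchLoop t p f i (f.getD (j-1) 0) acc fuel
      else
        pvSearchLoop t p f (i+1) j acc fuel
    else acc

def kmp_search_all_occurrences (text : String) (pattern : String) : List Int :=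
  if text.toList = [] ∨ pattern.toList = [] then []
  else
    let t := text.toList
    let p := pattern.toList
    let f := pvBuildFailureTable p
    pvSearchLoop t p f 0 0 [] (2 * t.length + p.length)

-- ===== PORT B =====
def kmp_search_all_occurrences_alt (text : String) (pattern : String) : List Int :=
  if text.toList = [] ∨ pattern.toList = [] then []
  else
    let t := text.toList
    let p := pattern.toList
    let n : Int := t.length
    let m : Int := p.length
    (PySem.List.pyRange 0 (n - m + 1) 1).filter
      (fun i => PySem.List.slice t (some i) (some (i + m)) == p)

-- ===== PRECONDITION & SPEC =====
def Spec_kmp_search_all_occurrences (text : String) (pattern : String) (out : List Int) : Prop := out = kmp_search_all_occurrences_alt text pattern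
instance (text : String) (pattern : String) (out : List Int) : Decidable (Spec_kmp_search_all_occurrences text pattern out) := by unfold Spec_kmp_search_all_occurrences; infer_instance

-- ===== CLAIM (what is proved, stated in full; the proofs are below) =====
def Claim_equal_kmp_search_all_occurrences : Prop := ∀ (text : String) (pattern : String), Dom_kmp_search_all_occurrences text pattern → Spec_kmp_search_all_occurrences text pattern (kmp_search_all_occurrences text pattern)

-- ===== LEMMAS AND PROOFS =====

-- `pvBrd p i k`: p.take k is a proper border (prefix = suffix) of p.take i.
def pvBrd (p : List Char) (i k : Nat) : Bool :=
  decide (k < i) && (p.take k == (p.take i).drop (i - k))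

-- longest proper border length of p.take i
def pvMB (p : List Char) (i : Nat) : Nat :=
  Nat.findGreatest (fun k => pvBrd p i k = true) i

-- occurrence of p at position s of t
def pvOcc (t p : List Char) (s : Nat) : Bool := (t.drop s).take p.length == p

lemma pvBrd_iff {p : List Char} {i k : Nat} :
    pvBrd p i k = true ↔ k < i ∧ p.take k = (p.take i).drop (i - k) := by
  simp [pvBrd]

lemma pvBrd_zero {p : List Char} {i : Nat} (h : 1 ≤ i) : pvBrd p i 0 = true := by
  rw [pvBrd_iff]
  exact ⟨h, by simp [List.drop_eq_nil_of_le]⟩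

lemma pvBrd_lt {p : List Char} {i k : Nat} (h : pvBrd p i k = true) : k < i :=
  (pvBrd_iff.1 h).1

lemma pvMB_brd {p : List Char} {i : Nat} (h : 1 ≤ i) : pvBrd p i (pvMB p i) = true := by
  unfold pvMB
  exact Nat.findGreatest_spec (P := fun k => pvBrd p i k = true) (Nat.zero_le i) (pvBrd_zero h)

lemma pvMB_lt {p : List Char} {i : Nat} (h : 1 ≤ i) : pvMB p i < i :=
  pvBrd_lt (pvMB_brd h)

lemma pvMB_ge {p : List Char} {i k : Nat} (h : pvBrd p i k = true) : k ≤ pvMB p i :=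
  Nat.le_findGreatest (Nat.le_of_lt (pvBrd_lt h)) h

-- border of a border is a border
lemma pvBrd_trans {p : List Char} {i b c : Nat}
    (h1 : pvBrd p i b = true) (h2 : pvBrd p b c = true) : pvBrd p i c = true := by
  obtain ⟨hb, e1⟩ := pvBrd_iff.1 h1
  obtain ⟨hc, e2⟩ := pvBrd_iff.1 h2
  rw [pvBrd_iff]
  refine ⟨by omega, ?_⟩
  rw [e2, e1, List.drop_drop]
  congr 1
  omega

-- of two borders the smaller is a border of the larger
lemma pvBrd_of_lt {p : List Char} {i b c : Nat}
    (h1 : pvBrd p i b = true) (h2 : pvBrd p i c = true) (h : c < b) : pvBrd p b c = true := by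
  obtain ⟨hb, e1⟩ := pvBrd_iff.1 h1
  obtain ⟨hc, e2⟩ := pvBrd_iff.1 h2
  rw [pvBrd_iff]
  refine ⟨h, ?_⟩
  rw [e2, e1, List.drop_drop]
  congr 1
  omega

lemma take_succ_getD {l : List Char} {i : Nat} (h : i < l.length) :
    l.take (i+1) = l.take i ++ [l.getD i ' '] := by
  rw [List.take_succ]
  simp [List.getElem?_eq_getElem h, List.getD, h]

-- extending a border by one matching character
lemma pvBrd_succ_iff {p : List Char} {i k : Nat} (hi : i < p.length) :
    pvBrd p (i+1) (k+1) = true ↔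
      pvBrd p i k = true ∧ p.getD i ' ' = p.getD k ' ' := by
  constructor
  · intro h
    obtain ⟨hk, e⟩ := pvBrd_iff.1 h
    have hki : k < i := by omega
    have hkp : k < p.length := by omega
    rw [take_succ_getD hi, take_succ_getD hkp] at e
    have hlen : i - k ≤ (p.take i).length := by simp; omega
    rw [show i + 1 - (k+1) = i - k by omega, List.drop_append_of_le_length hlen] at e
    have e2 := List.append_inj' e (by simp)
    refine ⟨pvBrd_iff.2 ⟨hki, e2.1⟩, ?_⟩
    have e3 := e2.2
    simp at e3
    exact e3.symm
  · rintro ⟨h, hc⟩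
    obtain ⟨hk, e⟩ := pvBrd_iff.1 h
    have hkp : k < p.length := by omega
    rw [pvBrd_iff]
    refine ⟨by omega, ?_⟩
    rw [take_succ_getD hi, take_succ_getD hkp,
      show i + 1 - (k+1) = i - k by omega,
      List.drop_append_of_le_length (by simp; omega), ← e, hc]

-- every border of p.take (i+1) is 0 or extends a border of p.take i
lemma pvBrd_succ_cases {p : List Char} {i k : Nat} (hi : i < p.length)
    (h : pvBrd p (i+1) k = true) :
    k = 0 ∨ ∃ b, k = b + 1 ∧ pvBrd p i b = true ∧ p.getD i ' ' = p.getD b ' ' := by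
  cases k with
  | zero => exact Or.inl rfl
  | succ b => exact Or.inr ⟨b, rfl, (pvBrd_succ_iff hi).1 h⟩

lemma pvMB_one {p : List Char} : pvMB p 1 = 0 := by
  have := pvMB_lt (p := p) (i := 1) le_rfl
  omega

lemma pvMB_eq {p : List Char} {i k : Nat} (hk : pvBrd p i k = true)
    (hmax : ∀ b, pvBrd p i b = true → b ≤ k) : pvMB p i = k := by
  have h1 : k ≤ pvMB p i := pvMB_ge hk
  have h2 : pvMB p i ≤ k := hmax _ (pvMB_brd (by have := pvBrd_lt hk; omega))
  omega

-- getD / set helpers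
lemma getD_set_self {l : List Nat} {i v : Nat} (h : i < l.length) :
    (l.set i v).getD i 0 = v := by
  simp [List.getD, h]

lemma getD_set_ne {l : List Nat} {i v k : Nat} (h : k ≠ i) :
    (l.set i v).getD k 0 = l.getD k 0 := by
  simp [List.getD, (Ne.symm h : i ≠ k)]

-- ===== correctness of the failure-table loop =====
lemma pvFailLoop_spec (p : List Char) :
    ∀ (fuel len i : Nat) (lps : List Nat),
      1 ≤ i → i ≤ p.length → lps.length = p.length →
      (∀ k, k < p.length → lps.getD k 0 = if k < i then pvMB p (k+1) else 0) →
      pvBrd p i len = true →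
      (∀ b, pvBrd p i b = true → len < b → p.getD i ' ' ≠ p.getD b ' ') →
      2 * (p.length - i) + len < fuel →
      ∀ k, k < p.length → (pvFailLoop p lps len i fuel).getD k 0 = pvMB p (k+1) := by
  intro fuel
  induction fuel with
  | zero => intro len i lps _ _ _ _ _ _ hf; omega
  | succ fuel ih =>
    intro len i lps hi1 him hll hlps hbrd hmax hf k hk
    rw [pvFailLoop]
    by_cases hi : i < p.length
    · rw [if_pos hi]
      have hlen_lt : len < i := pvBrd_lt hbrd
      by_cases hc : p.getD i ' ' = p.getD len ' '
      · rw [if_pos hc]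
        have hnew : pvBrd p (i+1) (len+1) = true := (pvBrd_succ_iff hi).2 ⟨hbrd, hc⟩
        have hub : ∀ b, pvBrd p (i+1) b = true → b ≤ len + 1 := by
          intro b hb
          rcases pvBrd_succ_cases hi hb with h0 | ⟨b', rfl, hb', hcb'⟩
          · omega
          · by_contra hgt
            exact hmax b' hb' (by omega) hcb'
        have hmb : pvMB p (i+1) = len + 1 := pvMB_eq hnew hub
        refine ih (len+1) (i+1) _ (by omega) (by omega) (by simp [hll]) ?_ hnew ?_ (by omega) k hk
        · intro k' hk'
          by_cases hki : k' = i
          · subst hki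
            rw [getD_set_self (by omega), if_pos (by omega), hmb]
          · rw [getD_set_ne hki, hlps k' hk']
            by_cases h2 : k' < i
            · rw [if_pos h2, if_pos (by omega)]
            · rw [if_neg h2, if_neg (by omega)]
        · intro b hb hlb
          have := hub b hb
          omega
      · rw [if_neg hc]
        by_cases hl0 : len ≠ 0
        · rw [if_pos hl0]
          have hlenpos : 1 ≤ len := by omega
          have hlen1 : len - 1 < p.length := by omega
          have hv : lps.getD (len-1) 0 = pvMB p len := by
            rw [hlps _ hlen1, if_pos (by omega), show len - 1 + 1 = len by omega]
          have hbrdlen : pvBrd p len (pvMB p len) = true := pvMB_brd hlenpos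
          have hnewbrd : pvBrd p i (pvMB p len) = true := pvBrd_trans hbrd hbrdlen
          have hmblt : pvMB p len < len := pvMB_lt hlenpos
          rw [hv]
          refine ih _ i lps hi1 him hll hlps hnewbrd ?_ (by omega) k hk
          intro b hb hlb
          by_cases hbl : b < len
          · exact absurd (pvMB_ge (pvBrd_of_lt hbrd hb hbl)) (by omega)
          · by_cases hbe : b = len
            · subst hbe; exact hc
            · exact hmax b hb (by omega)
        · rw [if_neg hl0]
          push_neg at hl0
          subst hl0
          have hub : ∀ b, pvBrd p (i+1) b = true → b = 0 := by
            intro b hb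
            rcases pvBrd_succ_cases hi hb with h0 | ⟨b', rfl, hb', hcb'⟩
            · exact h0
            · exfalso
              rcases Nat.eq_zero_or_pos b' with hb0 | hbpos
              · subst hb0; exact hc hcb'
              · exact hmax b' hb' hbpos hcb'
          have hmb : pvMB p (i+1) = 0 :=
            pvMB_eq (pvBrd_zero (by omega)) (fun b hb => by rw [hub b hb])
          refine ih 0 (i+1) _ (by omega) (by omega) (by simp [hll]) ?_
            (pvBrd_zero (by omega)) ?_ (by omega) k hk
          · intro k' hk'
            by_cases hki : k' = i
            · subst hki
              rw [getD_set_self (by omega), if_pos (by omega), hmb]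
            · rw [getD_set_ne hki, hlps k' hk']
              by_cases h2 : k' < i
              · rw [if_pos h2, if_pos (by omega)]
              · rw [if_neg h2, if_neg (by omega)]
          · intro b hb hlb
            have := hub b hb
            omega
    · rw [if_neg hi]
      have : i = p.length := by omega
      rw [hlps k hk, if_pos (by omega)]

lemma pvBuildFailureTable_spec {p : List Char} (hp : p ≠ []) :
    ∀ k, k < p.length → (pvBuildFailureTable p).getD k 0 = pvMB p (k+1) := by
  have hm : 1 ≤ p.length := List.length_pos_iff.2 hp
  refine pvFailLoop_spec p (2*p.length) 0 1 _ le_rfl hm (by simp) ?_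
    (pvBrd_zero le_rfl) ?_ (by omega)
  · intro k hk
    have hrep : (List.replicate p.length (0:Nat)).getD k 0 = 0 := by
      simp [List.getD, hk]
    rw [hrep]
    by_cases h1 : k < 1
    · rw [if_pos h1, show k = 0 by omega, pvMB_one]
    · rw [if_neg h1]
  · intro b hb hlb
    have := pvBrd_lt hb
    omega

-- ===== facts about pvOcc =====
lemma pvOcc_iff {t p : List Char} {s : Nat} :
    pvOcc t p s = true ↔ (t.drop s).take p.length = p := by simp [pvOcc]

lemma pvOcc_len {t p : List Char} {s : Nat} (hp : 1 ≤ p.length)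
    (h : pvOcc t p s = true) : s + p.length ≤ t.length := by
  have e := pvOcc_iff.1 h
  have h2 := congrArg List.length e
  simp at h2
  omega

lemma occ_getD {t p : List Char} {s k : Nat} (hocc : pvOcc t p s = true)
    (hk : k < p.length) : t.getD (s+k) ' ' = p.getD k ' ' := by
  have e := pvOcc_iff.1 hocc
  have h2 : t[s+k]? = p[k]? := by
    rw [← e, List.getElem?_take, if_pos hk, List.getElem?_drop]
  simp [List.getD, h2]

-- an occurrence inside the currently matched window gives a border of p.take j
lemma occ_border {t p : List Char} {s i j : Nat}
    (hji : j ≤ i) (hjm : j ≤ p.length)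
    (hpm : p.take j = (t.take i).drop (i - j))
    (hs1 : i - j < s) (hs2 : s < i)
    (hocc : pvOcc t p s = true) : pvBrd p j (i - s) = true := by
  rw [pvBrd_iff]
  have hk1 : i - s < j := by omega
  refine ⟨hk1, ?_⟩
  have e := pvOcc_iff.1 hocc
  have e1 : p.take (i - s) = (t.drop s).take (i - s) := by
    conv_lhs => rw [← e]
    rw [List.take_take]
    congr 1
    omega
  have e2 : (p.take j).drop (j - (i - s)) = (t.drop s).take (i - s) := by
    rw [hpm, List.drop_drop, show i - j + (j - (i-s)) = s by omega, List.drop_take,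
      show i - s = i - s by rfl]
  rw [e1, e2]

lemma ext_match {t p : List Char} {i j : Nat}
    (hi : i < t.length) (hj : j < p.length)
    (hpm : p.take j = (t.take i).drop (i - j))
    (hc : t.getD i ' ' = p.getD j ' ') :
    p.take (j+1) = (t.take (i+1)).drop (i - j) := by
  rw [take_succ_getD hj, take_succ_getD hi,
    List.drop_append_of_le_length (by simp; omega), ← hpm, hc]

lemma fallback_partial {t p : List Char} {i j : Nat}
    (hj1 : 1 ≤ j)
    (hpm : p.take j = (t.take i).drop (i - j)) (hji : j ≤ i) :
    p.take (pvMB p j) = (t.take i).drop (i - pvMB p j) := by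
  obtain ⟨hlt, e⟩ := pvBrd_iff.1 (pvMB_brd hj1)
  rw [e, hpm, List.drop_drop]
  congr 1
  omega

-- extending a filtered range over a region with no occurrences
lemma filt_ext (t p : List Char) :
    ∀ (b a : Nat), a ≤ b → (∀ s, a ≤ s → s < b → pvOcc t p s = false) →
      (List.range b).filter (fun s => pvOcc t p s) =
      (List.range a).filter (fun s => pvOcc t p s) := by
  intro b
  induction b with
  | zero => intro a ha _; simp_all
  | succ b ih =>
    intro a ha hno
    by_cases hab : a = b + 1
    · subst hab; rfl
    · have hab' : a ≤ b := by omega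
      rw [List.range_succ, List.filter_append]
      simp [hno b hab' (by omega)]
      exact ih a hab' (fun s h1 h2 => hno s h1 (by omega))

-- ===== correctness of the search loop =====
lemma pvSearchLoop_spec (t p : List Char) (f : List Nat) (hp : p ≠ [])
    (hf : ∀ k, k < p.length → f.getD k 0 = pvMB p (k+1)) :
    ∀ (fuel i j : Nat) (acc : List Int),
      j ≤ i → i ≤ t.length → j < p.length →
      p.take j = (t.take i).drop (i - j) →
      acc = ((List.range (i - j)).filter (fun s => pvOcc t p s)).map Int.ofNat →
      2 * (t.length - i) + j < fuel →
      pvSearchLoop t p f i j acc fuel =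
        ((List.range (t.length + 1 - p.length)).filter (fun s => pvOcc t p s)).map Int.ofNat := by
  have hm : 1 ≤ p.length := List.length_pos_iff.2 hp
  intro fuel
  induction fuel with
  | zero => intro i j acc _ _ _ _ _ hfu; omega
  | succ fuel ih =>
    intro i j acc hji hin hjm hpm hacc hfu
    rw [pvSearchLoop]
    by_cases hi : i < t.length
    · rw [if_pos hi]
      by_cases hc : t.getD i ' ' = p.getD j ' '
      · rw [if_pos hc]
        have hpm' : p.take (j+1) = (t.take (i+1)).drop (i - j) :=
          ext_match hi hjm hpm hc
        by_cases hjend : j + 1 = p.length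
        · rw [if_pos hjend]
          -- full match ending at i+1, start s0 = i - j = i + 1 - p.length
          have hmle : p.length ≤ i + 1 := by omega
          have hfull : p.take p.length = (t.take (i+1)).drop (i + 1 - p.length) := by
            rw [← hjend, hpm']
            congr 1
            omega
          have hfull' : p = (t.take (i+1)).drop (i + 1 - p.length) := by
            conv_lhs => rw [← List.take_length (l := p)]
            exact hfull
          have hocc : pvOcc t p (i - j) = true := by
            rw [pvOcc_iff]
            have : (t.take (i+1)).drop (i + 1 - p.length) =
                (t.drop (i + 1 - p.length)).take p.length := by
              rw [List.drop_take]
              congr 1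
              omega
            rw [show i - j = i + 1 - p.length by omega, ← this, ← hfull']
          -- the new j is the longest border of the whole pattern
          have hj' : f.getD (j+1-1) 0 = pvMB p p.length := by
            rw [show j+1-1 = j by omega, hf j hjm, show j + 1 = p.length from hjend]
          have hmbm : pvMB p p.length < p.length := pvMB_lt hm
          -- no occurrence strictly between i-j and (i+1) - pvMB
          have hno : ∀ s, i - j < s → s < i + 1 - pvMB p p.length →
              pvOcc t p s = false := by
            intro s h1 h2
            by_contra h
            have hocc' : pvOcc t p s = true := by simpa using h
            have hb := occ_border (t := t) (p := p) (s := s) (i := i+1) (j := p.length)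
              hmle le_rfl hfull (by omega) (by omega) hocc'
            have := pvMB_ge hb
            omega
          rw [hj']
          refine ih (i+1) (pvMB p p.length) _ (by omega) (by omega) (by omega)
            ?_ ?_ (by omega)
          · exact fallback_partial hm hfull hmle
          · rw [hacc]
            have step1 : (List.range (i - j + 1)).filter (fun s => pvOcc t p s) =
                ((List.range (i - j)).filter (fun s => pvOcc t p s)) ++ [i - j] := by
              rw [List.range_succ, List.filter_append]
              simp [hocc]
            have step2 : (List.range (i + 1 - pvMB p p.length)).filter (fun s => pvOcc t p s) =
                (List.range (i - j + 1)).filter (fun s => pvOcc t p s) :=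
              filt_ext t p _ _ (by omega) (fun s h1 h2 => hno s (by omega) h2)
            rw [step2, step1, List.map_append]
            congr 1
            simp
            omega
        · rw [if_neg hjend]
          refine ih (i+1) (j+1) acc (by omega) (by omega) (by omega)
            (by rw [show i + 1 - (j+1) = i - j by omega]; exact hpm')
            (by rw [show i + 1 - (j+1) = i - j by omega]; exact hacc) (by omega)
      · rw [if_neg hc]
        by_cases hj0 : j > 0
        · rw [if_pos hj0]
          have hj' : f.getD (j-1) 0 = pvMB p j := by
            rw [hf (j-1) (by omega), show j - 1 + 1 = j by omega]
          have hmbj : pvMB p j < j := pvMB_lt (by omega)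
          have hno : ∀ s, i - j ≤ s → s < i - pvMB p j → pvOcc t p s = false := by
            intro s h1 h2
            by_contra h
            have hocc' : pvOcc t p s = true := by simpa using h
            by_cases he : s = i - j
            · subst he
              have := occ_getD hocc' hjm (k := j)
              rw [show i - j + j = i by omega] at this
              exact hc this
            · have hb := occ_border (t := t) (p := p) (s := s) (i := i) (j := j)
                hji (by omega) hpm (by omega) (by omega) hocc'
              have := pvMB_ge hb
              omega
          rw [hj']
          refine ih i (pvMB p j) acc (by omega) (by omega) (by omega)
            (fallback_partial (by omega) hpm hji) ?_ (by omega)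
          rw [hacc]
          congr 1
          exact (filt_ext t p _ _ (by omega) hno).symm
        · rw [if_neg hj0]
          have hj0' : j = 0 := by omega
          subst hj0'
          have hno : pvOcc t p i = false := by
            by_contra h
            have hocc' : pvOcc t p i = true := by simpa using h
            have := occ_getD hocc' hm (k := 0)
            rw [Nat.add_zero] at this
            exact hc this
          refine ih (i+1) 0 acc (by omega) (by omega) hjm
            (by simp [List.drop_eq_nil_of_le]) ?_ (by omega)
          rw [hacc, show i + 1 - 0 = (i - 0) + 1 by omega, List.range_succ,
            List.filter_append]
          simp [hno]
    · rw [if_neg hi]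
      have hie : i = t.length := by omega
      subst hie
      rw [hacc]
      congr 1
      refine filt_ext t p (t.length - j) (t.length + 1 - p.length) (by omega) ?_
      intro s h1 h2
      by_contra h
      have hocc' : pvOcc t p s = true := by simpa using h
      have := pvOcc_len hm hocc'
      omega

-- the B side computes the same filtered range
lemma alt_eq_naive (t p : List Char) :
    (PySem.List.pyRange 0 ((t.length : Int) - (p.length : Int) + 1) 1).filter
      (fun i => PySem.List.slice t (some i) (some (i + (p.length : Int))) == p) =
    ((List.range (t.length + 1 - p.length)).filter (fun s => pvOcc t p s)).map Int.ofNat := by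
  rw [PySem.List.pyRange_one]
  have htn : (((t.length : Int) - (p.length : Int) + 1) - 0).toNat
      = t.length + 1 - p.length := by omega
  rw [htn, List.filter_map]
  have h1 : ((fun i : Int => PySem.List.slice t (some i) (some (i + (p.length : Int))) == p)
      ∘ (fun k : Nat => 0 + (k : Int))) = (fun s => pvOcc t p s) := by
    funext k
    simp [Function.comp, PySem.List.slice_natCast_add, pvOcc]
  rw [h1]
  apply List.map_congr_left
  intro k _
  simp

theorem kmp_search_all_occurrences_spec : Claim_equal_kmp_search_all_occurrences := by
  intro text pattern _
  unfold Spec_kmp_search_all_occurrences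
  unfold kmp_search_all_occurrences kmp_search_all_occurrences_alt
  by_cases hg : text.toList = [] ∨ pattern.toList = []
  · rw [if_pos hg, if_pos hg]
  · rw [if_neg hg, if_neg hg]
    push_neg at hg
    obtain ⟨ht, hpn⟩ := hg
    have hA := pvSearchLoop_spec text.toList pattern.toList
      (pvBuildFailureTable pattern.toList) hpn (pvBuildFailureTable_spec hpn)
      (2 * text.toList.length + pattern.toList.length) 0 0 []
      le_rfl (by omega) (List.length_pos_iff.2 hpn) (by simp) (by simp)
      (by have := List.length_pos_iff.2 hpn; omega)
    rw [hA, alt_eq_naive]
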